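-- pv_equiv track=rewrite | github.com/HomayoonAlimohammadi/Training | DailyProblem/8_7_2022.py | solution
-- ===== SOURCE A (Python) =====
-- def solution(intervals: list[tuple[int]]) -> int:
--     intervals.sort(key=lambda tup: tup[0])
--
--     max_classes = 0
--     for idx, current_interval in enumerate(intervals):
--         before_idx = idx - 1
--         n_overlapping = 1
--         while before_idx >= 0 and intervals[before_idx][1] > current_interval[0]:
--             n_overlapping += 1
--             before_idx -= 1
--         max_classes = max(max_classes, n_overlapping)
--
--     return max_classes
-- ===== SOURCE B (Python) =====
-- def solution(intervals: list[tuple[int]]) -> int: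
--     intervals.sort(key=lambda tup: tup[0])
--
--     best = 0
--     for i, iv in enumerate(intervals):
--         # rightmost earlier interval whose end does not exceed this start
--         last = -1
--         for j in range(i):
--             if intervals[j][1] <= iv[0]:
--                 last = j
--         best = max(best, i - last)
--     return best
-- ===== Notes on version B (the rewrite author's own statement) =====
-- stated objective: alternative
-- what changed: A counts overlapping predecessors by an early-stopping backward while-loop; B instead computes, by a forward scan, the rightmost earlier interval whose end is at most the current start and takes i minus that index, maximised over i.
import Mathlib
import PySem

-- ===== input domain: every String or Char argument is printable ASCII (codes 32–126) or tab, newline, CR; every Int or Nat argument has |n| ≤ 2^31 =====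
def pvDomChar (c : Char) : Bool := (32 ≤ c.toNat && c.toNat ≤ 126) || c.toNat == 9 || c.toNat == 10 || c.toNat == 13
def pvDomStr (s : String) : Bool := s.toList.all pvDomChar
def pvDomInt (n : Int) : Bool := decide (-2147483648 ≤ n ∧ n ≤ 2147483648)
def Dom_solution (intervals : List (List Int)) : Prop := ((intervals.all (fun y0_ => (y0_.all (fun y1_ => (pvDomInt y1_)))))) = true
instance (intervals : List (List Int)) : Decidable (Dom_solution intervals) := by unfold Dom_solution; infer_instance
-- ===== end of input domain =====

-- B replaces A's early-stopping backward count of overlapping predecessors by a forward scan for the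
-- rightmost earlier interval whose end does not exceed the current start (answer = i - that index);
-- alternative decomposition, same cost. Both A and B sort the argument list in place (equivalence is
-- about the return value; B performs the same mutation).

-- ===== PORT A =====
-- the while loop: 'while before_idx >= 0 and intervals[before_idx][1] > current_interval[0]: n += 1; before_idx -= 1'
def solWhileA (ivs : List (List Int)) (s : Int) (before : Int) (n : Int) : Int :=
  if h : 0 ≤ before ∧ (PySem.List.pyGetD (PySem.List.pyGetD ivs before []) 1 0) > s then
    solWhileA ivs s (before - 1) (n + 1)
  else n
termination_by (before + 1).toNat
decreasing_by omega

def solution (intervals : List (List Int)) : Int :=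
  let ivs := PySem.List.sorted intervals (fun tup => PySem.List.pyGetD tup 0 0)
  (PySem.List.enumerate ivs 0).foldl
    (fun mc p => max mc (solWhileA ivs (PySem.List.pyGetD p.2 0 0) (p.1 - 1) 1)) 0

-- ===== PORT B =====
def solution_alt (intervals : List (List Int)) : Int :=
  let ivs := PySem.List.sorted intervals (fun tup => PySem.List.pyGetD tup 0 0)
  (PySem.List.enumerate ivs 0).foldl
    (fun best p =>
      let last := (PySem.List.pyRange 0 p.1 1).foldl
        (fun last j =>
          if PySem.List.pyGetD (PySem.List.pyGetD ivs j []) 1 0 ≤ PySem.List.pyGetD p.2 0 0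
          then j else last) (-1)
      max best (p.1 - last)) 0

-- ===== PRECONDITION & SPEC =====
-- Pre_ is exactly where A returns: every interval has both endpoints, except that the one interval
-- sorting strictly last (all earlier ones have a smaller-or-equal start, all later ones a strictly
-- smaller start) may consist of a start alone — its end is never inspected; on every other short or
-- empty sublist A raises IndexError.
def Pre_solution (intervals : List (List Int)) : Prop :=
  ∀ p ∈ PySem.List.enumerate intervals 0, 2 ≤ p.2.length ∨
    (p.2.length = 1 ∧ ∀ q ∈ PySem.List.enumerate intervals 0,
      (q.1 < p.1 → PySem.List.pyGetD q.2 0 0 ≤ PySem.List.pyGetD p.2 0 0) ∧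
      (p.1 < q.1 → PySem.List.pyGetD q.2 0 0 < PySem.List.pyGetD p.2 0 0))
instance (intervals : List (List Int)) : Decidable (Pre_solution intervals) := by
  unfold Pre_solution; infer_instance

def pvWitness_solution : List (List Int) := [[0, 2], [1, 3], [2, 4]]

def Spec_solution (intervals : List (List Int)) (out : Int) : Prop := out = solution_alt intervals
instance (intervals : List (List Int)) (out : Int) : Decidable (Spec_solution intervals out) := by
  unfold Spec_solution; infer_instance

-- ===== CLAIM (what is proved, stated in full; the proofs are below) =====
def Claim_equal_solution : Prop :=
  ∀ (intervals : List (List Int)), Dom_solution intervals → Pre_solution intervals →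
    Spec_solution intervals (solution intervals)

-- ===== LEMMAS AND PROOFS =====

-- B's inner forward scan: rightmost j < i with end_j ≤ s (or -1)
def lastIdx (ivs : List (List Int)) (s : Int) (i : Int) : Int :=
  (PySem.List.pyRange 0 i 1).foldl
    (fun last j =>
      if PySem.List.pyGetD (PySem.List.pyGetD ivs j []) 1 0 ≤ s then j else last) (-1)

lemma solWhileA_eq (ivs : List (List Int)) (s : Int) :
    ∀ (k : Nat) (n : Int),
      solWhileA ivs s ((k : Int) - 1) n = n + ((k : Int) - 1 - lastIdx ivs s k) := by
  intro k
  induction k with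
  | zero =>
    intro n
    rw [solWhileA]
    simp [lastIdx, PySem.List.pyRange_one_eq_nil]
  | succ k ih =>
    intro n
    have hrange : PySem.List.pyRange 0 ((k : Int) + 1) 1
        = PySem.List.pyRange 0 (k : Int) 1 ++ [(k : Int)] :=
      PySem.List.pyRange_one_succ_right (by positivity)
    have hcast : ((k + 1 : Nat) : Int) - 1 = (k : Int) := by push_cast; ring
    rw [hcast, solWhileA]
    by_cases hc : PySem.List.pyGetD (PySem.List.pyGetD ivs (k : Int) []) 1 0 > s
    · rw [dif_pos ⟨Int.natCast_nonneg k, hc⟩]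
      rw [ih]
      have hl : lastIdx ivs s ((k + 1 : Nat) : Int) = lastIdx ivs s k := by
        unfold lastIdx
        push_cast
        rw [hrange, List.foldl_append]
        simp only [List.foldl_cons, List.foldl_nil]
        rw [if_neg (not_le.mpr hc)]
      rw [hl]; ring
    · rw [dif_neg (by tauto)]
      have hl : lastIdx ivs s ((k + 1 : Nat) : Int) = (k : Int) := by
        unfold lastIdx
        push_cast
        rw [hrange, List.foldl_append]
        simp only [List.foldl_cons, List.foldl_nil]
        rw [if_pos (not_lt.mp hc)]
      rw [hl]; ring

lemma body_eq (ivs : List (List Int)) (mc : Int) (p : Int × List Int)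
    (hp : p ∈ PySem.List.enumerate ivs 0) :
    max mc (solWhileA ivs (PySem.List.pyGetD p.2 0 0) (p.1 - 1) 1)
      = max mc (p.1 - lastIdx ivs (PySem.List.pyGetD p.2 0 0) p.1) := by
  rcases (PySem.List.mem_enumerate_iff _ _ _).1 hp with ⟨k, hk, rfl⟩
  simp only [zero_add]
  rw [solWhileA_eq]
  ring_nf

-- ===== VERDICT (by name: the statement is the Claim_ definition above) =====
theorem solution_spec : Claim_equal_solution := by
  intro intervals _ _
  unfold Spec_solution solution solution_alt
  apply PySem.List.foldl_congr_mem
  intro mc p hp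
  exact body_eq _ mc p hp
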